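-- pv_equiv track=rewrite | github.com/Juriij/KSI_2024-2025 | 2. wave/Karel, robot kuchyňský/solution.py | bake
-- ===== SOURCE A (Python) =====
-- Bowl = list[str]
--
-- def bake(bowl_a: Bowl, bowl_b: Bowl, bowl_c: Bowl) -> Bowl:
--     longest_bowl = []
--     new_bowl_a = []
--
--     if len(bowl_a) == 0:
--         return bowl_b + bowl_c
--
--     if len(bowl_b) >= len(bowl_c):
--         longest_bowl = bowl_b
--
--     else:
--         longest_bowl = bowl_c
--
--     if len(longest_bowl) <= len(bowl_a):
--         new_bowl_a = bowl_a[:len(longest_bowl)]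
--
--     else:
--         remainder = len(longest_bowl) % len(bowl_a)
--
--         for _ in range(len(longest_bowl) // len(bowl_a)):
--             new_bowl_a.extend(bowl_a)
--
--         new_bowl_a.extend(bowl_a[:remainder])
--
--     return new_bowl_a + bowl_b + bowl_c
-- ===== SOURCE B (Python) =====
-- def bake(bowl_a, bowl_b, bowl_c):
--     if not bowl_a:
--         return bowl_b + bowl_c
--     n = len(bowl_a)
--     L = max(len(bowl_b), len(bowl_c))
--     # build the cyclic prefix element by element via modular indexing,
--     # with no block copying, truncation branch or repetition loop
--     return [bowl_a[i % n] for i in range(L)] + bowl_b + bowl_c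
-- ===== Notes on version B (the rewrite author's own statement) =====
-- stated objective: simpler
-- what changed: Replaces A's truncate-vs-repeat branch, block-copy extend loop and remainder slice with a single per-element comprehension that picks bowl_a[i % n] for each target index i in range(max(len(b),len(c))).
import Mathlib
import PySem

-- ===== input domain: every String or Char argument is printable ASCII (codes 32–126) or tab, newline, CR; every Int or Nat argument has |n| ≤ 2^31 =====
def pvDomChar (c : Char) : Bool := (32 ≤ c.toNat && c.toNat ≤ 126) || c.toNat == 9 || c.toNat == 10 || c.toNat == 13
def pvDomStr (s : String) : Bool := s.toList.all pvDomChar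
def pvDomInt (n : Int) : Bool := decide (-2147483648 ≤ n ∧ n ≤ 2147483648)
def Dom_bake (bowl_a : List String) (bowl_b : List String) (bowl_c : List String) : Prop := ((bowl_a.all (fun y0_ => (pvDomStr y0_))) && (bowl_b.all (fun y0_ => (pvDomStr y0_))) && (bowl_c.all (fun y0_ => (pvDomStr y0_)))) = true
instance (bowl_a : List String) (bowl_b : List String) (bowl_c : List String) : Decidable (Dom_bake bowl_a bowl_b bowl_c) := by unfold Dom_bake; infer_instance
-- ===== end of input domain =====

-- B replaces A's truncate-vs-repeat branch, block-copy loop and remainder slice with one per-index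
-- modular comprehension bowl_a[i % n] for i in range(max lengths) (objective: simpler).

-- ===== PORT A =====
def bake (bowl_a : List String) (bowl_b : List String) (bowl_c : List String) : List String :=
  if bowl_a.length = 0 then bowl_b ++ bowl_c
  else
    let longest_bowl := if bowl_b.length ≥ bowl_c.length then bowl_b else bowl_c
    let new_bowl_a :=
      if longest_bowl.length ≤ bowl_a.length then
        PySem.List.slice bowl_a none (some (longest_bowl.length : Int))
      else
        let remainder := PySem.Int.mod (longest_bowl.length : Int) (bowl_a.length : Int)
        let looped := (PySem.List.pyRange 0 (PySem.Int.floordiv (longest_bowl.length : Int) (bowl_a.length : Int)) 1).foldl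
          (fun acc _ => acc ++ bowl_a) []
        looped ++ PySem.List.slice bowl_a none (some remainder)
    new_bowl_a ++ bowl_b ++ bowl_c

-- ===== PORT B =====
-- Source B's comprehension [bowl_a[i % n] for i in range(L)]: i % n is in [0, n), so the
-- getD with dummy default "" is exact for Python's bowl_a[i % n] (never an IndexError).
def bake_alt (bowl_a : List String) (bowl_b : List String) (bowl_c : List String) : List String :=
  if bowl_a.isEmpty then bowl_b ++ bowl_c
  else
    let n := bowl_a.length
    let L := max bowl_b.length bowl_c.length
    ((List.range L).map (fun i => bowl_a.getD (i % n) "")) ++ bowl_b ++ bowl_c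

-- ===== PRECONDITION & SPEC =====
def Spec_bake (bowl_a : List String) (bowl_b : List String) (bowl_c : List String) (out : List String) : Prop := out = bake_alt bowl_a bowl_b bowl_c
instance (bowl_a : List String) (bowl_b : List String) (bowl_c : List String) (out : List String) : Decidable (Spec_bake bowl_a bowl_b bowl_c out) := by unfold Spec_bake; infer_instance

-- ===== CLAIM (what is proved, stated in full; the proofs are below) =====
def Claim_equal_bake : Prop := ∀ (bowl_a : List String) (bowl_b : List String) (bowl_c : List String), Dom_bake bowl_a bowl_b bowl_c → Spec_bake bowl_a bowl_b bowl_c (bake bowl_a bowl_b bowl_c)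

-- ===== LEMMAS AND PROOFS =====

-- The loop "for _ in range(q): new.extend(bowl_a)" accumulates q flattened copies of bowl_a.
theorem foldl_extend (a : List String) (l : List Int) (init : List String) :
    l.foldl (fun acc _ => acc ++ a) init = init ++ (List.replicate l.length a).flatten := by
  induction l generalizing init with
  | nil => simp
  | cons x xs ih => simp [List.foldl, ih, List.replicate_succ, List.append_assoc]

-- Core identity over Nat: A's branch result equals the L-truncation of enough copies of a.
theorem core (a : List String) (ha : a ≠ []) (L : Nat) :
    (if L ≤ a.length then a.take L
     else (List.replicate (L / a.length) a).flatten ++ a.take (L % a.length))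
    = ((List.replicate (L / a.length + 1) a).flatten).take L := by
  have hn : 0 < a.length := List.length_pos_iff.mpr ha
  rw [List.replicate_succ' (n := L / a.length), List.flatten_append, List.take_append]
  have hlen : ((List.replicate (L / a.length) a).flatten).length = L / a.length * a.length := by
    simp [List.length_flatten, List.map_replicate, Nat.mul_comm]
  have hdm := Nat.div_add_mod L a.length
  have hmul : L / a.length * a.length ≤ L := Nat.div_mul_le_self L a.length
  split_ifs with h
  · rcases Nat.lt_or_ge L a.length with h1 | h1
    · have hq : L / a.length = 0 := Nat.div_eq_of_lt h1
      simp [hq]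
    · have hq : L = a.length := Nat.le_antisymm h h1
      subst hq
      simp [Nat.div_self hn, List.take_of_length_le (le_refl a.length)]
  · have h1 : min L ((List.replicate (L / a.length) a).flatten).length
        = ((List.replicate (L / a.length) a).flatten).length := by rw [hlen]; omega
    rw [List.take_of_length_le (l := (List.replicate (L / a.length) a).flatten)
          (by rw [hlen]; exact hmul), hlen]
    have hr : L % a.length = L - L / a.length * a.length := by rw [Nat.mul_comm]; omega
    rw [hr]
    simp

-- Indexing into q flattened copies of a is modular indexing into a.
theorem flat_getD (a : List String) (ha : a ≠ []) (q : Nat) :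
    ∀ i, i < q * a.length →
      ((List.replicate q a).flatten).getD i "" = a.getD (i % a.length) "" := by
  have hn : 0 < a.length := List.length_pos_iff.mpr ha
  induction q with
  | zero => intro i hi; omega
  | succ q ih =>
    intro i hi
    rw [List.replicate_succ, List.flatten_cons]
    by_cases h : i < a.length
    · rw [List.getD_append _ _ _ _ h, Nat.mod_eq_of_lt h]
    · push Not at h
      have hs : (q + 1) * a.length = q * a.length + a.length := by ring
      rw [List.getD_append_right _ _ _ _ h, ih (i - a.length) (by omega)]
      congr 1
      conv_rhs => rw [← Nat.sub_add_cancel h, Nat.add_mod_right]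

-- Truncating enough copies of a to length L equals the per-index modular map.
theorem take_flatten_eq_map (a : List String) (ha : a ≠ []) (L : Nat) :
    ((List.replicate (L / a.length + 1) a).flatten).take L
    = (List.range L).map (fun i => a.getD (i % a.length) "") := by
  have hn : 0 < a.length := List.length_pos_iff.mpr ha
  have hflen : ((List.replicate (L / a.length + 1) a).flatten).length
      = (L / a.length + 1) * a.length := by
    simp [List.length_flatten, List.map_replicate, Nat.mul_comm]
  have hL : L ≤ (L / a.length + 1) * a.length := by
    have h1 : (L / a.length + 1) * a.length = a.length * (L / a.length) + a.length := by ring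
    have h2 := Nat.div_add_mod L a.length
    have h3 := Nat.mod_lt L hn
    omega
  apply List.ext_getElem
  · simp [hflen]; omega
  · intro i h1 h2
    have hiL : i < L := by simpa using h2
    simp only [List.getElem_take, List.getElem_map, List.getElem_range]
    have := flat_getD a ha (L / a.length + 1) i (by omega)
    simpa [List.getD_eq_getElem?_getD, List.getElem?_eq_getElem, hflen,
      show i < (L / a.length + 1) * a.length by omega,
      show i % a.length < a.length from Nat.mod_lt i hn] using this

-- A's new_bowl_a expression equals the modular map up to length L.
theorem newA_eq (a : List String) (ha : a ≠ []) (L : Nat) :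
    (if L ≤ a.length then PySem.List.slice a none (some (L : Int))
     else (PySem.List.pyRange 0 (PySem.Int.floordiv (L : Int) (a.length : Int)) 1).foldl
            (fun acc _ => acc ++ a) []
          ++ PySem.List.slice a none (some (PySem.Int.mod (L : Int) (a.length : Int))))
    = (List.range L).map (fun i => a.getD (i % a.length) "") := by
  have hcore := core a ha L
  have htake := take_flatten_eq_map a ha L
  rw [PySem.Int.floordiv_natCast L a.length, PySem.Int.mod_natCast L a.length]
  rw [PySem.List.slice_to_natCast, PySem.List.slice_to_natCast]
  rw [foldl_extend, PySem.List.length_pyRange_one, List.nil_append]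
  generalize L / a.length = q at *
  have h1 : (((q : Nat) : Int) - 0).toNat = q := by omega
  rw [h1]
  exact hcore.trans htake

-- ===== VERDICT (by name: the statement is the Claim_ definition above) =====
theorem bake_spec : Claim_equal_bake := by
  intro a b c _
  unfold Spec_bake bake bake_alt
  by_cases ha : a = []
  · subst ha; simp
  · have hne : ¬ a.length = 0 := by simp [ha]
    have hempty : ¬ a.isEmpty = true := by simp [ha]
    rw [if_neg hne, if_neg hempty]
    by_cases h : b.length ≥ c.length
    · have hmax : max b.length c.length = b.length := by omega
      simp only [if_pos h, hmax]
      rw [newA_eq a ha b.length]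
    · have hmax : max b.length c.length = c.length := by omega
      simp only [if_neg h, hmax]
      rw [newA_eq a ha c.length]
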